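-- pv_equiv track=rewrite | github.com/fchabrun/winec | winec_display.py | rework_onoff_with_times
-- ===== SOURCE A (Python) =====
-- def rework_onoff_with_times(time, onoff):
--     time_rw, onoff_rw = [], []
--     prev_onoff = None
--     for new_t, new_onoff in zip(time, onoff):
--         if prev_onoff is not None:
--             if prev_onoff != new_onoff:
--                 time_rw.append(new_t)
--                 onoff_rw.append(prev_onoff)
--         prev_onoff = new_onoff
--         time_rw.append(new_t)
--         onoff_rw.append(new_onoff)
--     return time_rw, onoff_rw
-- ===== SOURCE B (Python) =====
-- def rework_onoff_with_times(time, onoff):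
--     # walk maximal runs of equal onoff state; emit a transition marker
--     # (first time of the new run, previous run's state) before each run after the first
--     pts = list(zip(time, onoff))
--     n = len(pts)
--     time_rw, onoff_rw = [], []
--     prev = None
--     i = 0
--     while i < n:
--         s = pts[i][1]
--         j = i + 1
--         while j < n and pts[j][1] == s:
--             j += 1
--         if prev is not None:
--             time_rw.append(pts[i][0])
--             onoff_rw.append(prev)
--         time_rw.extend(t for t, _ in pts[i:j])
--         onoff_rw.extend([s] * (j - i))
--         prev = s
--         i = j
--     return time_rw, onoff_rw
-- ===== Notes on version B (the rewrite author's own statement) =====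
-- stated objective: alternative
-- what changed: B groups the zipped points into maximal runs of equal onoff state and emits each run in bulk with one transition marker (first time of the run, previous run's state) before every run after the first, instead of A's per-point loop comparing each state with the previous one.
import Mathlib
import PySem

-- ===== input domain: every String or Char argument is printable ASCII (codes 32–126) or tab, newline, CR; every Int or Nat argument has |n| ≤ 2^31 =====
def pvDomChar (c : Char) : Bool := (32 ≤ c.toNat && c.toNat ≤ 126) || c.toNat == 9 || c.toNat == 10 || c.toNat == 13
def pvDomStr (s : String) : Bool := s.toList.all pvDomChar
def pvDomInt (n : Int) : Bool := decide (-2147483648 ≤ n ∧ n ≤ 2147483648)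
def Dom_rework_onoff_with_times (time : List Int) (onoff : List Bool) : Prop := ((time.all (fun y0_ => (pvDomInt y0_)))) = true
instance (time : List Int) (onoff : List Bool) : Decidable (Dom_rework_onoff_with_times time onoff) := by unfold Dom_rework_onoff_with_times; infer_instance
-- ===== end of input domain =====

-- B walks maximal runs of equal state instead of A's per-point prev comparison; objective: alternative decomposition (same cost).

-- ===== PORT A =====
-- loop body of A: state is (time_rw, onoff_rw, prev_onoff)
def pvStepA (st : List Int × List Bool × Option Bool) (p : Int × Bool) : List Int × List Bool × Option Bool :=
  let tr := st.1
  let orr := st.2.1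
  let prev := st.2.2
  let (tr, orr) :=
    match prev with
    | some pv => if pv != p.2 then (tr ++ [p.1], orr ++ [pv]) else (tr, orr)
    | none => (tr, orr)
  (tr ++ [p.1], orr ++ [p.2], some p.2)

def rework_onoff_with_times (time : List Int) (onoff : List Bool) : List Int × List Bool :=
  let r := (time.zip onoff).foldl pvStepA ([], [], none)
  (r.1, r.2.1)

-- ===== PORT B =====
-- outer while-loop of Source B: consume one maximal run of equal state per call;
-- takeWhile/dropWhile is the inner `while k < len(pts) and pts[k][1] == s` scan + `pts = pts[k:]`
def pvAltGo : List (Int × Bool) → Option Bool → List Int → List Bool → List Int × List Bool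
  | [], _, tr, orr => (tr, orr)
  | (t, s) :: rest, prev, tr, orr =>
    let same := rest.takeWhile (fun p => p.2 == s)
    let restr := rest.dropWhile (fun p => p.2 == s)
    let ts := t :: same.map Prod.fst
    let (tr, orr) :=
      match prev with
      | some pv => (tr ++ [t], orr ++ [pv])
      | none => (tr, orr)
    pvAltGo restr (some s) (tr ++ ts) (orr ++ List.replicate ts.length s)
termination_by pts => pts.length
decreasing_by
  simp only [List.length_cons]
  exact Nat.lt_succ_of_le (List.length_dropWhile_le _ _)

def rework_onoff_with_times_alt (time : List Int) (onoff : List Bool) : List Int × List Bool :=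
  pvAltGo (time.zip onoff) none [] []

-- ===== PRECONDITION & SPEC =====
def Spec_rework_onoff_with_times (time : List Int) (onoff : List Bool) (out : List Int × List Bool) : Prop := out = rework_onoff_with_times_alt time onoff
instance (time : List Int) (onoff : List Bool) (out : List Int × List Bool) : Decidable (Spec_rework_onoff_with_times time onoff out) := by unfold Spec_rework_onoff_with_times; infer_instance

-- ===== CLAIM (what is proved, stated in full; the proofs are below) =====
def Claim_equal_rework_onoff_with_times : Prop := ∀ (time : List Int) (onoff : List Bool), Dom_rework_onoff_with_times time onoff → Spec_rework_onoff_with_times time onoff (rework_onoff_with_times time onoff)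

-- ===== LEMMAS AND PROOFS =====

-- reference streaming form both ports are reduced to
def pvEmit (prev : Option Bool) : List (Int × Bool) → List Int × List Bool
  | [] => ([], [])
  | (t, s) :: rest =>
    let e := pvEmit (some s) rest
    match prev with
    | some pv => if pv != s then (t :: t :: e.1, pv :: s :: e.2) else (t :: e.1, s :: e.2)
    | none => (t :: e.1, s :: e.2)

lemma pvFoldA (ps : List (Int × Bool)) : ∀ (tr : List Int) (orr : List Bool) (prev : Option Bool),
    (ps.foldl pvStepA (tr, orr, prev)).1 = tr ++ (pvEmit prev ps).1 ∧
    (ps.foldl pvStepA (tr, orr, prev)).2.1 = orr ++ (pvEmit prev ps).2 := by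
  induction ps with
  | nil => intro tr orr prev; simp [pvEmit]
  | cons p rest ih =>
    intro tr orr prev
    obtain ⟨t, s⟩ := p
    cases prev with
    | none =>
      simpa [pvStepA, pvEmit] using ih (tr ++ [t]) (orr ++ [s]) (some s)
    | some pv =>
      by_cases h : pv = s
      · subst h
        simpa [pvStepA, pvEmit] using ih (tr ++ [t]) (orr ++ [pv]) (some pv)
      · have hb : (pv != s) = true := by simp [h]
        simpa [pvStepA, pvEmit, hb] using ih (tr ++ [t] ++ [t]) (orr ++ [pv] ++ [s]) (some s)

lemma pvEmit_run : ∀ (same restr : List (Int × Bool)) (s : Bool), (∀ p ∈ same, p.2 = s) →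
    pvEmit (some s) (same ++ restr) =
      (same.map Prod.fst ++ (pvEmit (some s) restr).1,
       List.replicate same.length s ++ (pvEmit (some s) restr).2) := by
  intro same
  induction same with
  | nil => intro restr s _; simp
  | cons p tail ih =>
    intro restr s h
    obtain ⟨t, s'⟩ := p
    have hs : s' = s := h (t, s') (by simp)
    subst hs
    simp [pvEmit, ih restr s' (fun q hq => h q (by simp [hq])), List.replicate_succ]

lemma pvDropWhile_head {α : Type} (p : α → Bool) (l : List α) :
    ∀ x, (l.dropWhile p).head? = some x → p x = false := by
  induction l with
  | nil => simp
  | cons a tl ih =>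
    intro x hx
    by_cases h : p a
    · exact ih x (by simpa [List.dropWhile, h] using hx)
    · simp only [List.dropWhile, h] at hx
      simp only [List.head?] at hx
      cases hx
      simpa using h

lemma pvAltGo_eq (n : ℕ) : ∀ (pts : List (Int × Bool)), pts.length ≤ n →
    ∀ (prev : Option Bool) (tr : List Int) (orr : List Bool),
    (∀ pv p, prev = some pv → pts.head? = some p → pv ≠ p.2) →
    pvAltGo pts prev tr orr = (tr ++ (pvEmit prev pts).1, orr ++ (pvEmit prev pts).2) := by
  induction n with
  | zero =>
    intro pts hlen prev tr orr _
    have : pts = [] := List.length_eq_zero_iff.mp (Nat.le_zero.mp hlen)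
    subst this
    simp [pvAltGo, pvEmit]
  | succ n ih =>
    intro pts hlen prev tr orr hhd
    cases pts with
    | nil => simp [pvAltGo, pvEmit]
    | cons p rest =>
      obtain ⟨t, s⟩ := p
      have hsplit : rest.takeWhile (fun q => q.2 == s) ++ rest.dropWhile (fun q => q.2 == s) = rest :=
        List.takeWhile_append_dropWhile
      have hall : ∀ q ∈ rest.takeWhile (fun q => q.2 == s), q.2 = s := by
        intro q hq
        simpa using List.mem_takeWhile_imp hq
      have hlen' : (rest.dropWhile (fun q => q.2 == s)).length ≤ n := by
        have := List.length_dropWhile_le (fun q : Int × Bool => q.2 == s) rest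
        simp only [List.length_cons] at hlen
        omega
      have hhd' : ∀ pv q, (some s : Option Bool) = some pv →
          (rest.dropWhile (fun q => q.2 == s)).head? = some q → pv ≠ q.2 := by
        intro pv q hpv hq
        cases hpv
        have := pvDropWhile_head (fun q : Int × Bool => q.2 == s) rest q hq
        simp at this
        exact fun h => this h.symm
      have hrec : ∀ (tr : List Int) (orr : List Bool),
          pvAltGo (rest.dropWhile (fun q => q.2 == s)) (some s) tr orr =
            (tr ++ (pvEmit (some s) (rest.dropWhile (fun q => q.2 == s))).1,
             orr ++ (pvEmit (some s) (rest.dropWhile (fun q => q.2 == s))).2) :=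
        fun tr orr => ih _ hlen' (some s) tr orr hhd'
      have hrun : pvEmit (some s) rest =
          ((rest.takeWhile (fun q => q.2 == s)).map Prod.fst ++
             (pvEmit (some s) (rest.dropWhile (fun q => q.2 == s))).1,
           List.replicate (rest.takeWhile (fun q => q.2 == s)).length s ++
             (pvEmit (some s) (rest.dropWhile (fun q => q.2 == s))).2) := by
        conv_lhs => rw [← hsplit]
        exact pvEmit_run _ _ s hall
      cases prev with
      | none =>
        simp only [pvAltGo]
        rw [hrec]
        simp [pvEmit, hrun, List.replicate_succ]
      | some pv =>
        have hpv : pv ≠ s := hhd pv (t, s) rfl rfl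
        have hb : (pv != s) = true := by simp [hpv]
        simp only [pvAltGo]
        rw [hrec]
        simp [pvEmit, hrun, hb, List.replicate_succ]

-- ===== VERDICT (by name: the statement is the Claim_ definition above) =====
theorem rework_onoff_with_times_spec : Claim_equal_rework_onoff_with_times := by
  intro time onoff _
  unfold Spec_rework_onoff_with_times rework_onoff_with_times rework_onoff_with_times_alt
  obtain ⟨h1, h2⟩ := pvFoldA (time.zip onoff) [] [] none
  rw [pvAltGo_eq (time.zip onoff).length (time.zip onoff) le_rfl none [] []
      (by intro pv p h; cases h)]
  simp [h1, h2]
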